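-- pv_equiv track=rewrite | github.com/PoonLab/HexSE | refact/new_sequence_info.py | sort_orfs
-- ===== SOURCE A (Python) =====
-- def sort_orfs(unsorted_orfs):
--     """
--     Store ORFs in position according to plus zero ORF (first of the list).
--     They will be classified as (+0, +1, +2, -0, -1, -2)
--     :return sorted_orfs: List of ORFs classified according to their shift relative to
--                 the plus zero reading frame  (+0, +1, +2, -0, -1, -2)
--     """
--     sorted_orfs = {'+0': [], '+1': [], '+2': [], '-0': [], '-1': [], '-2': []}
--
--     if unsorted_orfs:
--         first_orf = unsorted_orfs[0]
--         for orf in unsorted_orfs: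
--             difference = abs(orf[0] - first_orf[0]) % 3
--
--             if first_orf[0] < first_orf[1]:
--                 if orf[0] < orf[1]:  # positive strand
--                     if difference == 0:
--                         sorted_orfs['+0'].append(orf)
--                     elif difference == 1:
--                         sorted_orfs['+1'].append(orf)
--                     elif difference == 2:
--                         sorted_orfs['+2'].append(orf)
--
--                 elif orf[0] > orf[1]:  # negative strand
--                     if difference == 0:
--                         sorted_orfs['-2'].append(orf)
--                     elif difference == 1:
--                         sorted_orfs['-1'].append(orf)
--                     elif difference == 2:
--                         sorted_orfs['-0'].append(orf)
--
--             else: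
--                 if orf[0] < orf[1]:  # positive strand
--                     if difference == 0:
--                         sorted_orfs['+2'].append(orf)
--                     elif difference == 1:  # plus one
--                         sorted_orfs['+1'].append(orf)
--                     elif difference == 2:  # plus two
--                         sorted_orfs['+0'].append(orf)
--
--                 elif orf[0] > orf[1]:  # negative strand
--                     if difference == 0:
--                         sorted_orfs['-0'].append(orf)
--                     elif difference == 1:
--                         sorted_orfs['-1'].append(orf)
--                     elif difference == 2:
--                         sorted_orfs['-2'].append(orf)
--
--     return sorted_orfs
-- ===== SOURCE B (Python) =====
-- def sort_orfs(unsorted_orfs):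
--     """Classify ORFs into (+0, +1, +2, -0, -1, -2) relative to the first ORF.
--
--     Instead of one pass that appends each ORF into a mutable bucket, compute a
--     label per ORF and build each bucket independently as a filter of the input
--     (six staged passes); bucket order within each list is the input order.
--     """
--     keys = ('+0', '+1', '+2', '-0', '-1', '-2')
--     if not unsorted_orfs:
--         return {k: [] for k in keys}
--     start, end = unsorted_orfs[0]
--     first_plus = start < end
--
--     def label(orf):
--         if orf[0] == orf[1]:
--             return None
--         plus = orf[0] < orf[1]
--         d = abs(orf[0] - start) % 3
--         f = d if plus == first_plus else 2 - d
--         return ('+' if plus else '-') + str(f)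
--
--     return {k: [orf for orf in unsorted_orfs if label(orf) == k] for k in keys}
-- ===== Notes on version B (the rewrite author's own statement) =====
-- stated objective: alternative
-- what changed: A makes one pass appending each ORF into a mutable six-bucket dict via a 24-leaf branch tree; B instead derives a label per ORF by closed-form frame arithmetic and builds each of the six buckets independently as a filter of the input list (six staged passes, no mutable accumulator).
import Mathlib
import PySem

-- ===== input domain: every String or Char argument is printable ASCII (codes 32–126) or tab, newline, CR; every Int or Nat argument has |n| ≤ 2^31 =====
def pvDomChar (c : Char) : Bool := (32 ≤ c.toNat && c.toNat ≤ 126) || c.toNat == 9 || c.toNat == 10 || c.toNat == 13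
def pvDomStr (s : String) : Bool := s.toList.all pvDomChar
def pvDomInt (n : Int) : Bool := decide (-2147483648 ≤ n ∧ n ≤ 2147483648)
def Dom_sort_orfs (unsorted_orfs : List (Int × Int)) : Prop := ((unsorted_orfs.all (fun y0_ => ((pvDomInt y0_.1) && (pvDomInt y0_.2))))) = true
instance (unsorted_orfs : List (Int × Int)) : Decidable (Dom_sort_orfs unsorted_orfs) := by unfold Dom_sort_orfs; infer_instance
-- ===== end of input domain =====

-- B builds each of the six buckets independently as a filter of the input over a
-- closed-form per-ORF label, instead of A's single fold appending through a 24-leaf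
-- branch tree into a mutable dict; objective: alternative.

-- ===== PORT A =====
-- the six empty buckets, in A's insertion order
def sortOrfsInit : PySem.Dict String (List (Int × Int)) :=
  PySem.Dict.ofList [("+0", []), ("+1", []), ("+2", []), ("-0", []), ("-1", []), ("-2", [])]

-- loop body of A (one ORF, the nested branch tree; append = modify with default [])
def sortOrfsStepA (first_orf : Int × Int) (d : PySem.Dict String (List (Int × Int)))
    (orf : Int × Int) : PySem.Dict String (List (Int × Int)) :=
  let difference := PySem.Int.mod (|orf.1 - first_orf.1|) 3
  if first_orf.1 < first_orf.2 then
    if orf.1 < orf.2 then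
      if difference = 0 then d.modify "+0" [] (· ++ [orf])
      else if difference = 1 then d.modify "+1" [] (· ++ [orf])
      else if difference = 2 then d.modify "+2" [] (· ++ [orf])
      else d
    else if orf.1 > orf.2 then
      if difference = 0 then d.modify "-2" [] (· ++ [orf])
      else if difference = 1 then d.modify "-1" [] (· ++ [orf])
      else if difference = 2 then d.modify "-0" [] (· ++ [orf])
      else d
    else d
  else
    if orf.1 < orf.2 then
      if difference = 0 then d.modify "+2" [] (· ++ [orf])
      else if difference = 1 then d.modify "+1" [] (· ++ [orf])
      else if difference = 2 then d.modify "+0" [] (· ++ [orf])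
      else d
    else if orf.1 > orf.2 then
      if difference = 0 then d.modify "-0" [] (· ++ [orf])
      else if difference = 1 then d.modify "-1" [] (· ++ [orf])
      else if difference = 2 then d.modify "-2" [] (· ++ [orf])
      else d
    else d

def sort_orfs (unsorted_orfs : List (Int × Int)) : List (String × List (Int × Int)) :=
  (match unsorted_orfs with
   | [] => sortOrfsInit
   | first_orf :: _ => unsorted_orfs.foldl (sortOrfsStepA first_orf) sortOrfsInit).items

-- ===== PORT B =====
-- per-ORF label: none for a degenerate ORF, else sign + closed-form frame
def sortOrfsLabel (start : Int) (first_plus : Bool) (orf : Int × Int) : Option String :=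
  if orf.1 = orf.2 then none
  else
    let plus : Bool := orf.1 < orf.2
    let d := PySem.Int.mod (|orf.1 - start|) 3
    let f := if plus = first_plus then d else 2 - d
    some ((if plus then "+" else "-") ++ PySem.Int.toStr f)

-- six staged passes: bucket k = the input filtered to the ORFs labelled k
def sort_orfs_alt (unsorted_orfs : List (Int × Int)) : List (String × List (Int × Int)) :=
  match unsorted_orfs with
  | [] => [("+0", []), ("+1", []), ("+2", []), ("-0", []), ("-1", []), ("-2", [])]
  | first :: _ =>
      ["+0", "+1", "+2", "-0", "-1", "-2"].map (fun k =>
        (k, unsorted_orfs.filter (fun orf =>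
              sortOrfsLabel first.1 (decide (first.1 < first.2)) orf == some k)))

-- ===== PRECONDITION & SPEC =====
def Spec_sort_orfs (unsorted_orfs : List (Int × Int)) (out : List (String × List (Int × Int))) : Prop := out = sort_orfs_alt unsorted_orfs
instance (unsorted_orfs : List (Int × Int)) (out : List (String × List (Int × Int))) : Decidable (Spec_sort_orfs unsorted_orfs out) := by unfold Spec_sort_orfs; infer_instance

-- ===== CLAIM =====
def Claim_equal_sort_orfs : Prop := ∀ (unsorted_orfs : List (Int × Int)), Dom_sort_orfs unsorted_orfs → Spec_sort_orfs unsorted_orfs (sort_orfs unsorted_orfs)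

-- ===== LEMMAS AND PROOFS =====

-- A's loop body is "append under the label", one case per leaf of A's tree
theorem stepA_eq_label (f : Int × Int) (d : PySem.Dict String (List (Int × Int)))
    (orf : Int × Int) :
    sortOrfsStepA f d orf =
      match sortOrfsLabel f.1 (decide (f.1 < f.2)) orf with
      | some k => d.modify k [] (· ++ [orf])
      | none => d := by
  unfold sortOrfsStepA sortOrfsLabel
  have h0 : 0 ≤ PySem.Int.mod (|orf.1 - f.1|) 3 := PySem.Int.mod_nonneg _ (by norm_num)
  have h3 : PySem.Int.mod (|orf.1 - f.1|) 3 < 3 := PySem.Int.mod_lt _ (by norm_num)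
  have hm : PySem.Int.mod (|orf.1 - f.1|) 3 = 0 ∨ PySem.Int.mod (|orf.1 - f.1|) 3 = 1 ∨
      PySem.Int.mod (|orf.1 - f.1|) 3 = 2 := by omega
  have k0 : ("+" ++ PySem.Int.toStr 0) = "+0" := by decide
  have k1 : ("+" ++ PySem.Int.toStr 1) = "+1" := by decide
  have k2 : ("+" ++ PySem.Int.toStr 2) = "+2" := by decide
  have k3 : ("-" ++ PySem.Int.toStr 0) = "-0" := by decide
  have k4 : ("-" ++ PySem.Int.toStr 1) = "-1" := by decide
  have k5 : ("-" ++ PySem.Int.toStr 2) = "-2" := by decide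
  rcases lt_trichotomy orf.1 orf.2 with ho | ho | ho <;>
    rcases lt_or_ge f.1 f.2 with hf | hf <;>
    rcases hm with hm | hm | hm <;>
    simp only [hm] <;>
    simp [ho, ne_of_lt, ne_of_gt, hf, not_lt_of_gt, not_lt.mpr, k0, k1, k2, k3, k4, k5]

-- the label, when present, is one of the six bucket keys
theorem label_cases (s : Int) (b : Bool) (orf : Int × Int) :
    sortOrfsLabel s b orf = none ∨ sortOrfsLabel s b orf = some "+0" ∨
    sortOrfsLabel s b orf = some "+1" ∨ sortOrfsLabel s b orf = some "+2" ∨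
    sortOrfsLabel s b orf = some "-0" ∨ sortOrfsLabel s b orf = some "-1" ∨
    sortOrfsLabel s b orf = some "-2" := by
  unfold sortOrfsLabel
  have h0 : 0 ≤ PySem.Int.mod (|orf.1 - s|) 3 := PySem.Int.mod_nonneg _ (by norm_num)
  have h3 : PySem.Int.mod (|orf.1 - s|) 3 < 3 := PySem.Int.mod_lt _ (by norm_num)
  have hm : PySem.Int.mod (|orf.1 - s|) 3 = 0 ∨ PySem.Int.mod (|orf.1 - s|) 3 = 1 ∨
      PySem.Int.mod (|orf.1 - s|) 3 = 2 := by omega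
  have k0 : ("+" ++ PySem.Int.toStr 0) = "+0" := by decide
  have k1 : ("+" ++ PySem.Int.toStr 1) = "+1" := by decide
  have k2 : ("+" ++ PySem.Int.toStr 2) = "+2" := by decide
  have k3 : ("-" ++ PySem.Int.toStr 0) = "-0" := by decide
  have k4 : ("-" ++ PySem.Int.toStr 1) = "-1" := by decide
  have k5 : ("-" ++ PySem.Int.toStr 2) = "-2" := by decide
  by_cases he : orf.1 = orf.2
  · simp [he]
  · by_cases hp : orf.1 < orf.2 <;> cases b <;> rcases hm with hm | hm | hm <;>
      simp only [he, hp, hm, if_true, if_false, decide_true, decide_false, Bool.false_eq_true] <;>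
      simp [k0, k1, k2, k3, k4, k5]

theorem modify_bucket_0 (l0 l1 l2 l3 l4 l5 : List (Int × Int)) (x : Int × Int) :
    (PySem.Dict.mk [("+0", l0), ("+1", l1), ("+2", l2), ("-0", l3), ("-1", l4), ("-2", l5)] : PySem.Dict String (List (Int × Int))).modify "+0" [] (· ++ [x])
      = PySem.Dict.mk [("+0", l0 ++ [x]), ("+1", l1), ("+2", l2), ("-0", l3), ("-1", l4), ("-2", l5)] := by
  simp [PySem.Dict.modify, PySem.Dict.insert, PySem.Dict.getD, PySem.Dict.get?, PySem.Dict.contains]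

theorem modify_bucket_1 (l0 l1 l2 l3 l4 l5 : List (Int × Int)) (x : Int × Int) :
    (PySem.Dict.mk [("+0", l0), ("+1", l1), ("+2", l2), ("-0", l3), ("-1", l4), ("-2", l5)] : PySem.Dict String (List (Int × Int))).modify "+1" [] (· ++ [x])
      = PySem.Dict.mk [("+0", l0), ("+1", l1 ++ [x]), ("+2", l2), ("-0", l3), ("-1", l4), ("-2", l5)] := by
  simp [PySem.Dict.modify, PySem.Dict.insert, PySem.Dict.getD, PySem.Dict.get?, PySem.Dict.contains]

theorem modify_bucket_2 (l0 l1 l2 l3 l4 l5 : List (Int × Int)) (x : Int × Int) :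
    (PySem.Dict.mk [("+0", l0), ("+1", l1), ("+2", l2), ("-0", l3), ("-1", l4), ("-2", l5)] : PySem.Dict String (List (Int × Int))).modify "+2" [] (· ++ [x])
      = PySem.Dict.mk [("+0", l0), ("+1", l1), ("+2", l2 ++ [x]), ("-0", l3), ("-1", l4), ("-2", l5)] := by
  simp [PySem.Dict.modify, PySem.Dict.insert, PySem.Dict.getD, PySem.Dict.get?, PySem.Dict.contains]

theorem modify_bucket_3 (l0 l1 l2 l3 l4 l5 : List (Int × Int)) (x : Int × Int) :
    (PySem.Dict.mk [("+0", l0), ("+1", l1), ("+2", l2), ("-0", l3), ("-1", l4), ("-2", l5)] : PySem.Dict String (List (Int × Int))).modify "-0" [] (· ++ [x])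
      = PySem.Dict.mk [("+0", l0), ("+1", l1), ("+2", l2), ("-0", l3 ++ [x]), ("-1", l4), ("-2", l5)] := by
  simp [PySem.Dict.modify, PySem.Dict.insert, PySem.Dict.getD, PySem.Dict.get?, PySem.Dict.contains]

theorem modify_bucket_4 (l0 l1 l2 l3 l4 l5 : List (Int × Int)) (x : Int × Int) :
    (PySem.Dict.mk [("+0", l0), ("+1", l1), ("+2", l2), ("-0", l3), ("-1", l4), ("-2", l5)] : PySem.Dict String (List (Int × Int))).modify "-1" [] (· ++ [x])
      = PySem.Dict.mk [("+0", l0), ("+1", l1), ("+2", l2), ("-0", l3), ("-1", l4 ++ [x]), ("-2", l5)] := by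
  simp [PySem.Dict.modify, PySem.Dict.insert, PySem.Dict.getD, PySem.Dict.get?, PySem.Dict.contains]

theorem modify_bucket_5 (l0 l1 l2 l3 l4 l5 : List (Int × Int)) (x : Int × Int) :
    (PySem.Dict.mk [("+0", l0), ("+1", l1), ("+2", l2), ("-0", l3), ("-1", l4), ("-2", l5)] : PySem.Dict String (List (Int × Int))).modify "-2" [] (· ++ [x])
      = PySem.Dict.mk [("+0", l0), ("+1", l1), ("+2", l2), ("-0", l3), ("-1", l4), ("-2", l5 ++ [x])] := by
  simp [PySem.Dict.modify, PySem.Dict.insert, PySem.Dict.getD, PySem.Dict.get?, PySem.Dict.contains]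

-- folding "append under the label" from any six-bucket state yields, per key,
-- the starting list followed by the input filtered to that label
theorem fold_items (L : Int × Int → Option String)
    (hL : ∀ x, L x = none ∨ L x = some "+0" ∨ L x = some "+1" ∨ L x = some "+2" ∨
        L x = some "-0" ∨ L x = some "-1" ∨ L x = some "-2")
    (xs : List (Int × Int)) (l0 l1 l2 l3 l4 l5 : List (Int × Int)) :
    (xs.foldl
        (fun d orf =>
          match L orf with
          | some k => d.modify k [] (· ++ [orf])
          | none => d)
        (PySem.Dict.mk [("+0", l0), ("+1", l1), ("+2", l2), ("-0", l3), ("-1", l4), ("-2", l5)])).items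
      = [("+0", l0 ++ xs.filter (fun o => L o == some "+0")),
         ("+1", l1 ++ xs.filter (fun o => L o == some "+1")),
         ("+2", l2 ++ xs.filter (fun o => L o == some "+2")),
         ("-0", l3 ++ xs.filter (fun o => L o == some "-0")),
         ("-1", l4 ++ xs.filter (fun o => L o == some "-1")),
         ("-2", l5 ++ xs.filter (fun o => L o == some "-2"))] := by
  induction xs generalizing l0 l1 l2 l3 l4 l5 with
  | nil => simp
  | cons x xs ih =>
    rcases hL x with h | h | h | h | h | h | h <;>
      simp only [List.foldl_cons, h] <;>
      [skip;
       rw [modify_bucket_0];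
       rw [modify_bucket_1];
       rw [modify_bucket_2];
       rw [modify_bucket_3];
       rw [modify_bucket_4];
       rw [modify_bucket_5]] <;>
      rw [ih] <;>
      simp [h, List.append_assoc]

theorem sort_orfs_spec : Claim_equal_sort_orfs := by
  intro xs _
  unfold Spec_sort_orfs sort_orfs sort_orfs_alt
  cases xs with
  | nil => rfl
  | cons first rest =>
    have hstep : sortOrfsStepA first =
        fun d orf =>
          match sortOrfsLabel first.1 (decide (first.1 < first.2)) orf with
          | some k => d.modify k [] (· ++ [orf])
          | none => d := by
      funext d orf; exact stepA_eq_label first d orf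
    have hinit : sortOrfsInit =
        PySem.Dict.mk [("+0", []), ("+1", []), ("+2", []), ("-0", []), ("-1", []), ("-2", [])] := by decide
    simp only [hstep, hinit]
    rw [fold_items _ (label_cases first.1 (decide (first.1 < first.2)))]
    simp [List.map]
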